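-- pv_equiv track=rewrite | github.com/aruiz2/WiFi-Receiver | submit/wifireceiver.py | restore_ascii_values
-- ===== SOURCE A (Python) =====
-- def restore_ascii_values(n_bits, bits_per_num, bits, ascii_values):
--     for start in range(0, n_bits, bits_per_num):
--         num = 0
--         for i in range(bits_per_num):
--
--             bit = bits[start + i]
--             if (bit == 1):
--                 exp =  (bits_per_num - 1) - (i % bits_per_num)
--                 num += int(2**(exp))
--
--         ascii_values[start//bits_per_num] = num
--     return ascii_values
-- ===== SOURCE B (Python) =====
-- def _decode_group(group):
--     num = 0
--     for bit in group:
--         num = 2 * num + (bit == 1)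
--     return num
--
-- def restore_ascii_values(n_bits, bits_per_num, bits, ascii_values):
--     decoded = [_decode_group(bits[s:s + bits_per_num])
--                for s in range(0, n_bits, bits_per_num)]
--     ascii_values[:len(decoded)] = decoded
--     return ascii_values
-- ===== Notes on version B (the rewrite author's own statement) =====
-- stated objective: idiomatic
-- what changed: B first builds the whole decoded prefix as a list comprehension (one Horner fold 2*num+bit per slice bits[s:s+bits_per_num], no 2**exp power and no start//bits_per_num division) and then splices it over ascii_values with one slice assignment, instead of A's per-group indexed writes into ascii_values.
-- outside the precondition, e.g. on restore_ascii_values(-1, -1, [1, 1], [5]): A returns [0], B returns [1]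
import Mathlib
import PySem

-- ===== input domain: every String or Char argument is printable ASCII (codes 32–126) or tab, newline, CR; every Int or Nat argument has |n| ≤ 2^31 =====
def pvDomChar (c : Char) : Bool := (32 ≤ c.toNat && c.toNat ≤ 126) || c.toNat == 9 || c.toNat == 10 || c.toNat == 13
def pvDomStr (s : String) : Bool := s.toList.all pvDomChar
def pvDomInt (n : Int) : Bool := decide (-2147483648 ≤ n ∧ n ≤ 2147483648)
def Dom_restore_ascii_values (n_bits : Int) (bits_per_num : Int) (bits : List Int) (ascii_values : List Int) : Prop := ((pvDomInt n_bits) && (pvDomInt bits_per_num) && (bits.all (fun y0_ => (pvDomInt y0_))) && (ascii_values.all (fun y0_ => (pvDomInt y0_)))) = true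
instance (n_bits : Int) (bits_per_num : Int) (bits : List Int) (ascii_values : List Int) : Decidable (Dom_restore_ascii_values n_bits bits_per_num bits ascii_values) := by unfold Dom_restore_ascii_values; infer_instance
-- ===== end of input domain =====

-- B builds the whole decoded prefix first (one Horner fold per slice, no 2**exp and no //) and
-- splices it over ascii_values with one slice assignment, instead of A's per-group indexed writes
-- (idiomatic; same cost).  Both Pythons mutate ascii_values in place to the same final state.

-- ===== PORT A =====
def restore_ascii_values (n_bits : Int) (bits_per_num : Int) (bits : List Int) (ascii_values : List Int) : List Int :=
  (PySem.List.pyRange 0 n_bits bits_per_num).foldl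
    (fun ascii_values start =>
      let num : Int :=
        (PySem.List.pyRange 0 bits_per_num 1).foldl
          (fun num i =>
            let bit := PySem.List.pyGetD bits (start + i) 0
            if bit == 1 then
              -- int(2**exp): exp ≥ 0 whenever this branch runs under Pre_, so .toNat is exact here
              num + 2 ^ ((bits_per_num - 1) - PySem.Int.mod i bits_per_num).toNat
            else num)
          0
      PySem.List.pySetD ascii_values (PySem.Int.floordiv start bits_per_num) num)
    ascii_values

-- ===== PORT B =====
-- helper _decode_group: Horner fold, num = 2*num + (bit == 1)
def pvDecodeGroup (group : List Int) : Int :=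
  group.foldl (fun num bit => 2 * num + (if bit == 1 then 1 else 0)) 0

def restore_ascii_values_alt (n_bits : Int) (bits_per_num : Int) (bits : List Int) (ascii_values : List Int) : List Int :=
  let decoded :=
    (PySem.List.pyRange 0 n_bits bits_per_num).map
      (fun s => pvDecodeGroup (PySem.List.slice bits (some s) (some (s + bits_per_num))))
  -- ascii_values[:len(decoded)] = decoded; return ascii_values
  decoded ++ ascii_values.drop decoded.length

-- ===== PRECONDITION & SPEC =====
-- Pre_ excludes exactly: bits_per_num = 0 (range step 0 → ValueError in A); group shapes on which A
-- hits an IndexError in bits[start+i] or ascii_values[start//bits_per_num]; and, inside the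
-- degenerate quadrant bits_per_num < 0 ∧ n_bits < 0 (where A's inner range(bits_per_num) is empty
-- so it writes meaningless zeros), the inputs where B's wrapped negative slice can actually reach
-- a set bit (len(bits) + bits_per_num > 0 and 1 ∈ bits) — a corner where neither value is specified.
def Pre_restore_ascii_values (n_bits : Int) (bits_per_num : Int) (bits : List Int) (ascii_values : List Int) : Prop :=
  bits_per_num ≠ 0 ∧
  (0 < bits_per_num → 0 < n_bits →
    ((n_bits + bits_per_num - 1) / bits_per_num) * bits_per_num ≤ (bits.length : Int) ∧
    (n_bits + bits_per_num - 1) / bits_per_num ≤ (ascii_values.length : Int)) ∧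
  (bits_per_num < 0 → n_bits < 0 →
    ((bits.length : Int) + bits_per_num ≤ 0 ∨ (1 : Int) ∉ bits) ∧
    (-n_bits + -bits_per_num - 1) / (-bits_per_num) ≤ (ascii_values.length : Int))
instance (n_bits : Int) (bits_per_num : Int) (bits : List Int) (ascii_values : List Int) : Decidable (Pre_restore_ascii_values n_bits bits_per_num bits ascii_values) := by unfold Pre_restore_ascii_values; infer_instance

def pvWitness_restore_ascii_values : Int × Int × List Int × List Int :=
  (16, 8, [0, 1, 0, 0, 1, 0, 0, 0, 0, 1, 0, 0, 0, 1, 0, 1], [0, 0])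

def Spec_restore_ascii_values (n_bits : Int) (bits_per_num : Int) (bits : List Int) (ascii_values : List Int) (out : List Int) : Prop := out = restore_ascii_values_alt n_bits bits_per_num bits ascii_values
instance (n_bits : Int) (bits_per_num : Int) (bits : List Int) (ascii_values : List Int) (out : List Int) : Decidable (Spec_restore_ascii_values n_bits bits_per_num bits ascii_values out) := by unfold Spec_restore_ascii_values; infer_instance

-- ===== CLAIM (what is proved, stated in full; the proofs are below) =====
def Claim_equal_restore_ascii_values : Prop := ∀ (n_bits : Int) (bits_per_num : Int) (bits : List Int) (ascii_values : List Int), Dom_restore_ascii_values n_bits bits_per_num bits ascii_values → Pre_restore_ascii_values n_bits bits_per_num bits ascii_values → Spec_restore_ascii_values n_bits bits_per_num bits ascii_values (restore_ascii_values n_bits bits_per_num bits ascii_values)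

-- ===== LEMMAS AND PROOFS =====

-- exact division cancels under Python floor division, for every nonzero divisor
theorem pv_floordiv_mul_cancel (b j : Int) (hb : b ≠ 0) : PySem.Int.floordiv (b * j) b = j := by
  have h := PySem.Int.floordiv_mul_add_mod (b * j) b
  have hm : PySem.Int.mod (b * j) b = 0 := (PySem.Int.mod_eq_zero_iff_dvd _ _).2 ⟨j, rfl⟩
  rw [hm, add_zero] at h
  exact mul_right_cancel₀ hb (by rw [h, mul_comm])

-- A's sequence of indexed writes at 0,1,…,K-1 builds the K-prefix and keeps the tail
theorem pv_set_fold (f : Nat → Int) : ∀ (K : Nat) (L : List Int), K ≤ L.length →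
    (List.range K).foldl (fun acc j => acc.set j (f j)) L
      = (List.range K).map f ++ L.drop K := by
  intro K
  induction K with
  | zero => intro L _; simp
  | succ K ih =>
    intro L h
    rw [List.range_succ]
    simp only [List.foldl_append, List.foldl_cons, List.foldl_nil, List.map_append,
      List.map_cons, List.map_nil]
    rw [ih L (by omega), List.set_append]
    simp only [List.length_map, List.length_range, lt_irrefl, if_false, Nat.sub_self]
    have hd : L.drop K = L[K] :: L.drop (K + 1) := List.drop_eq_getElem_cons (by omega)
    rw [hd, List.set_cons_zero]
    simp [List.append_assoc]

-- reading index i of the group slice bits[s : s+m] is reading bits[s+i]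
theorem pv_getD_drop_take (bits : List Int) (s m i : Nat) (hi : i < m) (h : s + m ≤ bits.length) :
    ((bits.drop s).take m).getD i 0 = bits.getD (s + i) 0 := by
  have h1 : i < ((bits.drop s).take m).length := by
    simp [List.length_take, List.length_drop]; omega
  have h2 : s + i < bits.length := by omega
  rw [List.getD_eq_getElem _ _ h1, List.getD_eq_getElem _ _ h2]
  simp [List.getElem_take, List.getElem_drop]

-- Horner's rule is affine in the accumulator
theorem pv_horner_acc (ys : List Int) (acc : Int) :
    ys.foldl (fun num bit => 2 * num + (if bit == 1 then 1 else 0)) acc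
      = acc * 2 ^ ys.length + ys.foldl (fun num bit => 2 * num + (if bit == 1 then 1 else 0)) 0 := by
  induction ys generalizing acc with
  | nil => simp
  | cons y t ih =>
    simp only [List.foldl_cons, List.length_cons]
    rw [ih (2 * acc + _), ih (2 * 0 + _)]
    ring

-- the A-side accumulator is additive
theorem pv_foldl_add_acc (f : Nat → Int) (n : Nat) (acc : Int) :
    (List.range n).foldl (fun num i => num + f i) acc
      = acc + (List.range n).foldl (fun num i => num + f i) 0 := by
  induction n generalizing acc with
  | zero => simp
  | succ n ih =>
    rw [List.range_succ]
    simp only [List.foldl_append, List.foldl_cons, List.foldl_nil]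
    rw [ih acc]; ring

-- so is A's power-sum step (the if pulled into the addend)
theorem pv_astep_acc (t : List Int) (n : Nat) (acc : Int) :
    (List.range n).foldl (fun num i => if t.getD i 0 == 1 then num + 2 ^ (t.length - (i + 1)) else num) acc
      = acc + (List.range n).foldl (fun num i => if t.getD i 0 == 1 then num + 2 ^ (t.length - (i + 1)) else num) 0 := by
  have hfun : (fun (num : Int) (i : Nat) => if t.getD i 0 == 1 then num + 2 ^ (t.length - (i + 1)) else num)
      = (fun num i => num + (if t.getD i 0 == 1 then (2 : Int) ^ (t.length - (i + 1)) else 0)) := by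
    funext num i; split <;> simp
  rw [hfun]
  exact pv_foldl_add_acc _ n acc

-- CORE: A's power-sum over group indices equals B's Horner fold over the group elements
theorem pv_core (ys : List Int) :
    (List.range ys.length).foldl
        (fun num i => if ys.getD i 0 == 1 then num + 2 ^ (ys.length - (i + 1)) else num) (0 : Int)
      = pvDecodeGroup ys := by
  unfold pvDecodeGroup
  induction ys with
  | nil => simp
  | cons y t ih =>
    simp only [List.length_cons, List.range_succ_eq_map, List.foldl_cons, List.foldl_map,
      List.getD_cons_zero, List.getD_cons_succ, Nat.succ_eq_add_one, Nat.succ_sub_succ, Nat.sub_zero]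
    rw [pv_astep_acc, ih, pv_horner_acc t (2 * 0 + if (y == 1) = true then (1 : Int) else 0)]
    by_cases hy : y = 1 <;> simp [hy]

-- A's inner power loop equals B's _decode_group of the slice, for one group
theorem pv_num_eq (bits : List Int) (bpn : Int) (s m : Nat) (hm : (m : Int) = bpn)
    (hlen : s + m ≤ bits.length) :
    (PySem.List.pyRange 0 bpn 1).foldl
      (fun num i =>
        if PySem.List.pyGetD bits ((s : Int) + i) 0 == 1 then
          num + 2 ^ ((bpn - 1) - PySem.Int.mod i bpn).toNat
        else num) (0 : Int)
    = pvDecodeGroup (PySem.List.slice bits (some (s : Int)) (some ((s : Int) + bpn))) := by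
  subst hm
  rw [PySem.List.slice_natCast_add bits s m]
  rw [PySem.List.pyRange_zero_natCast m, List.foldl_map]
  have hylen : ((bits.drop s).take m).length = m := by
    simp [List.length_take, List.length_drop]; omega
  rw [← pv_core ((bits.drop s).take m), hylen]
  apply PySem.List.foldl_congr_mem
  intro acc i hi
  simp only [List.mem_range] at hi
  have h1 : (s : Int) + (i : Int) = ((s + i : Nat) : Int) := by push_cast; ring
  have h2 : PySem.Int.mod (i : Int) (m : Int) = (i : Int) := by
    rw [PySem.Int.mod_eq_emod_of_pos (by exact_mod_cast Nat.zero_lt_of_lt hi)]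
    exact Int.emod_eq_of_lt (by positivity) (by exact_mod_cast hi)
  have h3 : (((m : Int) - 1) - (i : Int)).toNat = m - (i + 1) := by omega
  simp only [h1, PySem.List.pyGetD_natCast, h2, h3,
    pv_getD_drop_take bits s m i hi hlen]

-- a Horner fold over a group with no set bit is 0
theorem pv_horner_zero (ys : List Int) (h : ∀ b ∈ ys, (b == 1) = false) :
    pvDecodeGroup ys = 0 := by
  unfold pvDecodeGroup
  induction ys with
  | nil => rfl
  | cons y t ih =>
    have hy := h y (List.mem_cons_self)
    simp only [List.foldl_cons, hy, Bool.false_eq_true, if_false]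
    simpa [pvDecodeGroup] using ih (fun b hb => h b (List.mem_cons_of_mem y hb))

theorem restore_ascii_values_spec : Claim_equal_restore_ascii_values := by
  intro n_bits bpn bits ascii _hdom hpre
  obtain ⟨hb0, hposPre, hnegPre⟩ := hpre
  unfold Spec_restore_ascii_values restore_ascii_values restore_ascii_values_alt
  rcases lt_or_gt_of_ne hb0 with hb | hb
  · -- bits_per_num < 0 : every group contributes 0 on both sides (A's range(bits_per_num) is empty,
    -- B's slices decode to 0 because Pre_ gives len(bits) + bits_per_num ≤ 0 or 1 ∉ bits)
    rw [PySem.List.pyRange_of_neg 0 n_bits hb]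
    set K : Nat := (if n_bits < 0 then ((0 - n_bits + -bpn - 1) / -bpn).toNat else 0) with hK
    have hinner : PySem.List.pyRange 0 bpn 1 = [] := PySem.List.pyRange_one_eq_nil hb.le
    simp only [List.foldl_map, List.map_map, Function.comp_def, List.length_map, List.length_range,
      hinner, List.foldl_nil, zero_add]
    by_cases hn : n_bits < 0
    swap
    · rw [hK, if_neg hn]; simp
    obtain ⟨hblen, hasc⟩ := hnegPre hb hn
    have hKasc : K ≤ ascii.length := by
      have hq0 : 0 ≤ (0 - n_bits + -bpn - 1) / -bpn := Int.ediv_nonneg (by omega) (by omega)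
      have h1 : (0 - n_bits + -bpn - 1) / -bpn ≤ (ascii.length : Int) := by
        have h2 : (0 : Int) - n_bits = -n_bits := by ring
        rw [h2]; exact hasc
      rw [hK, if_pos hn]
      omega
    have hstep : ∀ (acc : List Int) (j : Nat), j ∈ List.range K →
        PySem.List.pySetD acc (PySem.Int.floordiv (bpn * (j : Int)) bpn) (0 : Int)
          = acc.set j (pvDecodeGroup (PySem.List.slice bits (some (bpn * (j : Int))) (some (bpn * (j : Int) + bpn)))) := by
      intro acc j _
      have hs0 : bpn * (j : Int) ≤ 0 := by
        have := Int.natCast_nonneg j; nlinarith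
      have hg : pvDecodeGroup (PySem.List.slice bits (some (bpn * (j : Int))) (some (bpn * (j : Int) + bpn))) = 0 := by
        rcases hblen with hblen | hblen
        · have hslice : PySem.List.slice bits (some (bpn * (j : Int))) (some (bpn * (j : Int) + bpn)) = [] := by
            apply List.eq_nil_of_length_eq_zero
            rw [PySem.List.length_slice]
            have hhi : PySem.List.clampIdx bits.length (bpn * (j : Int) + bpn) = 0 := by
              simp only [PySem.List.clampIdx]
              split_ifs <;> omega
            omega
          rw [hslice]; rfl
        · exact pv_horner_zero _ (fun b hb' => by
            have := PySem.List.mem_of_mem_slice bits _ _ hb'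
            simp only [beq_eq_false_iff_ne, ne_eq]
            exact fun h1 => hblen (h1 ▸ this))
      rw [hg, pv_floordiv_mul_cancel bpn (j : Int) hb0, PySem.List.pySetD_natCast]
    rw [PySem.List.foldl_congr_mem (List.range K) _ _ ascii hstep, pv_set_fold _ K ascii hKasc]
  · -- bits_per_num > 0
    rw [PySem.List.pyRange_of_pos 0 n_bits hb]
    set K : Nat := (if 0 < n_bits then ((n_bits - 0 + bpn - 1) / bpn).toNat else 0) with hK
    simp only [List.foldl_map, List.map_map, Function.comp_def, List.length_map, List.length_range,
      zero_add]
    have hm : (bpn.toNat : Int) = bpn := Int.toNat_of_nonneg hb.le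
    have hKbits : (K : Int) * bpn ≤ (bits.length : Int) ∧ K ≤ ascii.length := by
      by_cases hn : 0 < n_bits
      · obtain ⟨h1, h2⟩ := hposPre hb hn
        have hq0 : 0 ≤ (n_bits + bpn - 1) / bpn := Int.ediv_nonneg (by omega) hb.le
        have hKe : (n_bits - 0 + bpn - 1) = (n_bits + bpn - 1) := by ring
        rw [hK, if_pos hn, hKe]
        constructor
        · rw [Int.toNat_of_nonneg hq0]; exact h1
        · omega
      · rw [hK, if_neg hn]; simp
    have hstep : ∀ (acc : List Int) (j : Nat), j ∈ List.range K →
        PySem.List.pySetD acc (PySem.Int.floordiv (bpn * (j : Int)) bpn)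
          ((PySem.List.pyRange 0 bpn 1).foldl
            (fun num i =>
              if PySem.List.pyGetD bits (bpn * (j : Int) + i) 0 == 1 then
                num + 2 ^ ((bpn - 1) - PySem.Int.mod i bpn).toNat
              else num) 0)
          = acc.set j (pvDecodeGroup (PySem.List.slice bits (some (bpn * (j : Int))) (some (bpn * (j : Int) + bpn)))) := by
      intro acc j hj
      simp only [List.mem_range] at hj
      have hs : bpn * (j : Int) = ((bpn.toNat * j : Nat) : Int) := by push_cast; rw [hm]
      have hlen : bpn.toNat * j + bpn.toNat ≤ bits.length := by
        have h1 : ((bpn.toNat * j + bpn.toNat : Nat) : Int) ≤ (K : Int) * bpn := by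
          push_cast
          rw [hm]
          have hjk : (j : Int) + 1 ≤ (K : Int) := by exact_mod_cast hj
          nlinarith [hb.le]
        exact_mod_cast le_trans h1 hKbits.1
      rw [hs, pv_num_eq bits bpn (bpn.toNat * j) bpn.toNat hm hlen,
        ← hs, pv_floordiv_mul_cancel bpn (j : Int) hb0, PySem.List.pySetD_natCast]
    rw [PySem.List.foldl_congr_mem (List.range K) _ _ ascii hstep, pv_set_fold _ K ascii hKbits.2]
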